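-- pv_equiv track=rewrite | github.com/CYB3R-BO1/SPIDER | agents/cgen_agent.py | _dfs_order
-- ===== SOURCE A (Python) =====
-- from typing import Dict, List, Optional, Set, Tuple
--
-- def _dfs_order(
--     entry: int, succs: Dict[int, Set[int]]
-- ) -> Tuple[List[int], List[Tuple[int, int]]]:
--     order = []
--     back_edges = []
--     visited: Set[int] = set()
--     stack: Set[int] = set()
--
--     def dfs(node: int):
--         visited.add(node)
--         stack.add(node)
--         order.append(node)
--         for nxt in sorted(succs.get(node, [])):
--             if nxt in stack:
--                 back_edges.append((node, nxt))
--             elif nxt not in visited: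
--                 dfs(nxt)
--         stack.remove(node)
--
--     if entry in succs:
--         dfs(entry)
--     return order, back_edges
-- ===== SOURCE B (Python) =====
-- def _dfs_order(entry, succs):
--     # Iterative DFS with an explicit frame stack (node + remaining sorted successors),
--     # replacing A's recursion; same order/back-edge interleaving, no recursion limit.
--     order = []
--     back_edges = []
--     visited = set()
--     on_path = set()
--     if entry in succs:
--         visited.add(entry)
--         on_path.add(entry)
--         order.append(entry)
--         frames = [(entry, sorted(succs.get(entry, [])))]
--         while frames:
--             node, pending = frames[-1]
--             if not pending:
--                 on_path.discard(node)
--                 frames.pop()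
--             else:
--                 nxt = pending[0]
--                 frames[-1] = (node, pending[1:])
--                 if nxt in on_path:
--                     back_edges.append((node, nxt))
--                 elif nxt not in visited:
--                     visited.add(nxt)
--                     on_path.add(nxt)
--                     order.append(nxt)
--                     frames.append((nxt, sorted(succs.get(nxt, []))))
--     return order, back_edges
-- ===== Notes on version B (the rewrite author's own statement) =====
-- stated objective: alternative
-- what changed: Replaced the recursive closure-based dfs by an iterative traversal over an explicit frame stack of (node, remaining sorted successors) pairs, preserving the exact order/back-edge interleaving without Python recursion.
import Mathlib
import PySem

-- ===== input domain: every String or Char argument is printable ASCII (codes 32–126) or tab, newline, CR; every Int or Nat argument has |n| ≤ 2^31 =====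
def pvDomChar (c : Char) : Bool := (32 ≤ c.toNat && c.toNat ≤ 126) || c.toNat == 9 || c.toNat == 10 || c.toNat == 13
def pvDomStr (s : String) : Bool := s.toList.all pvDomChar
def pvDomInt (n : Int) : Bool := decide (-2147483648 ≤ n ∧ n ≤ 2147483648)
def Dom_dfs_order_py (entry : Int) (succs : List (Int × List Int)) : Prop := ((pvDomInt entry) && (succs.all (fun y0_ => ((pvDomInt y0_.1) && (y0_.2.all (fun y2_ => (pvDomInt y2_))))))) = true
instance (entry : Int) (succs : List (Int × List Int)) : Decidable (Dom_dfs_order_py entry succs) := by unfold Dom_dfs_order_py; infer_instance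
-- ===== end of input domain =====

-- B replaces A's recursive dfs by an iterative explicit-frame-stack traversal (objective: alternative);
-- both ports carry a fuel counter (one unit per loop iteration / machine step, never exhausted in practice)
-- as the standard totality device; the equivalence holds for every fuel value.

-- shared state of the traversal: order, back_edges, visited, on-path set
structure PVSt where
  order : List Int
  back : List (Int × Int)
  visited : PySem.Set Int
  path : PySem.Set Int
deriving Repr, DecidableEq

-- visited.add(node); stack.add(node); order.append(node)
def pvVisit (node : Int) (s : PVSt) : PVSt :=
  { s with visited := PySem.Set.add s.visited node,
           path := PySem.Set.add s.path node,
           order := s.order ++ [node] }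

-- stack.remove(node)
def pvExit (node : Int) (s : PVSt) : PVSt :=
  { s with path := PySem.Set.discard s.path node }

-- sorted(succs.get(node, []))
def pvSorted (succs : List (Int × List Int)) (node : Int) : List Int :=
  PySem.List.sorted ((PySem.Dict.mk succs).getD node []) (fun x => x) false

-- generous fuel, enough for the whole traversal on any input
def pvFuel (succs : List (Int × List Int)) : Nat :=
  2 * (succs.length + (succs.map (fun p => p.2.length)).sum) + 2

-- ===== PORT A =====
-- A's recursive dfs: the for-loop over the sorted successors, with the recursive call
-- dfs(nxt) inlined one level (visit nxt, then loop over its sorted successors);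
-- stack.remove(node) fires when the loop ends ([] case).  Returns the state and the
-- remaining fuel (bounded by the input fuel, which drives termination).
def dfsALoop (succs : List (Int × List Int)) (node : Int) (l : List Int) (s : PVSt)
    (f : Nat) : { p : PVSt × Nat // p.2 ≤ f } :=
  match f, l with
  | 0, _ => ⟨(s, 0), Nat.le_refl 0⟩
  | f + 1, [] => ⟨(pvExit node s, f), Nat.le_succ f⟩
  | f + 1, nxt :: rest =>
    if PySem.Set.contains s.path nxt then
      let r := dfsALoop succs node rest { s with back := s.back ++ [(node, nxt)] } f
      ⟨r.1, Nat.le_trans r.2 (Nat.le_succ f)⟩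
    else if PySem.Set.contains s.visited nxt then
      let r := dfsALoop succs node rest s f
      ⟨r.1, Nat.le_trans r.2 (Nat.le_succ f)⟩
    else
      -- dfs(nxt)
      let r1 := dfsALoop succs nxt (pvSorted succs nxt) (pvVisit nxt s) f
      let r2 := dfsALoop succs node rest r1.1.1 r1.1.2
      ⟨r2.1, Nat.le_trans r2.2 (Nat.le_trans r1.2 (Nat.le_succ f))⟩
termination_by (f, l.length)
decreasing_by
  · exact Prod.Lex.left _ _ (Nat.lt_succ_self f)
  · exact Prod.Lex.left _ _ (Nat.lt_succ_self f)
  · exact Prod.Lex.left _ _ (Nat.lt_succ_self f)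
  · exact Prod.Lex.left _ _ (Nat.lt_succ_of_le r1.2)

def dfs_order_py (entry : Int) (succs : List (Int × List Int)) : List Int × (List (Int × Int)) :=
  let s0 : PVSt := ⟨[], [], PySem.Set.empty, PySem.Set.empty⟩
  if (PySem.Dict.mk succs).contains entry then
    let r := dfsALoop succs entry (pvSorted succs entry) (pvVisit entry s0) (pvFuel succs)
    (r.1.1.order, r.1.1.back)
  else (s0.order, s0.back)

-- ===== PORT B =====
-- B's while-loop over the explicit frame stack: each frame is (node, remaining pending
-- successors); one fuel unit per iteration.
def dfsBRun (succs : List (Int × List Int)) (f : Nat) (frames : List (Int × List Int))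
    (s : PVSt) : PVSt :=
  match f, frames with
  | 0, _ => s
  | _ + 1, [] => s
  | f + 1, (node, []) :: fr => dfsBRun succs f fr (pvExit node s)
  | f + 1, (node, nxt :: rest) :: fr =>
    if PySem.Set.contains s.path nxt then
      dfsBRun succs f ((node, rest) :: fr) { s with back := s.back ++ [(node, nxt)] }
    else if PySem.Set.contains s.visited nxt then
      dfsBRun succs f ((node, rest) :: fr) s
    else
      dfsBRun succs f ((nxt, pvSorted succs nxt) :: (node, rest) :: fr) (pvVisit nxt s)

def dfs_order_py_alt (entry : Int) (succs : List (Int × List Int)) : List Int × (List (Int × Int)) :=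
  let s0 : PVSt := ⟨[], [], PySem.Set.empty, PySem.Set.empty⟩
  if (PySem.Dict.mk succs).contains entry then
    let s := dfsBRun succs (pvFuel succs) [(entry, pvSorted succs entry)] (pvVisit entry s0)
    (s.order, s.back)
  else (s0.order, s0.back)

-- ===== PRECONDITION & SPEC =====
def Spec_dfs_order_py (entry : Int) (succs : List (Int × List Int)) (out : List Int × (List (Int × Int))) : Prop := out = dfs_order_py_alt entry succs
instance (entry : Int) (succs : List (Int × List Int)) (out : List Int × (List (Int × Int))) : Decidable (Spec_dfs_order_py entry succs out) := by unfold Spec_dfs_order_py; infer_instance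

-- ===== CLAIM (what is proved, stated in full; the proofs are below) =====
def Claim_equal_dfs_order_py : Prop := ∀ (entry : Int) (succs : List (Int × List Int)), Dom_dfs_order_py entry succs → Spec_dfs_order_py entry succs (dfs_order_py entry succs)

-- ===== LEMMAS AND PROOFS =====

theorem dfsBRun_nil (succs : List (Int × List Int)) (f : Nat) (s : PVSt) :
    dfsBRun succs f [] s = s := by
  cases f <;> simp [dfsBRun]

-- simulation: running the machine with a top frame (node, l) equals running A's loop
-- on (node, l) and then continuing the machine on the rest, with the leftover fuel
theorem dfsB_sim (succs : List (Int × List Int)) :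
    ∀ (f : Nat) (node : Int) (l : List Int) (s : PVSt) (fr : List (Int × List Int)),
      dfsBRun succs f ((node, l) :: fr) s =
        dfsBRun succs (dfsALoop succs node l s f).1.2 fr (dfsALoop succs node l s f).1.1 := by
  intro f
  induction f using Nat.strong_induction_on with
  | _ f ih =>
    intro node l s fr
    match f, l with
    | 0, l => simp [dfsBRun, dfsALoop]
    | f + 1, [] => simp [dfsBRun, dfsALoop]
    | f + 1, nxt :: rest =>
      rw [dfsALoop]
      by_cases hp : PySem.Set.contains s.path nxt = true
      · simp only [dfsBRun, hp, if_pos]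
        exact ih f (Nat.lt_succ_self f) node rest _ fr
      · by_cases hv : PySem.Set.contains s.visited nxt = true
        · simp only [dfsBRun, hp, hv, if_pos]
          exact ih f (Nat.lt_succ_self f) node rest s fr
        · simp only [dfsBRun, hp, hv]
          rw [ih f (Nat.lt_succ_self f) nxt (pvSorted succs nxt) (pvVisit nxt s) ((node, rest) :: fr)]
          exact ih _ (Nat.lt_succ_of_le (dfsALoop succs nxt (pvSorted succs nxt) (pvVisit nxt s) f).2)
            node rest _ fr

-- ===== VERDICT (by name: the statement is the Claim_ definition above) =====
theorem dfs_order_py_spec : Claim_equal_dfs_order_py := by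
  intro entry succs _
  unfold Spec_dfs_order_py dfs_order_py dfs_order_py_alt
  by_cases h : (PySem.Dict.mk succs).contains entry = true
  · simp only [h, if_pos]
    rw [dfsB_sim, dfsBRun_nil]
  · simp [h]
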